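-- pv_equiv track=rewrite | github.com/gabriellaec/desoft-analise-exercicios | backup/user_109/ch93_2019_10_02_17_50_08_601869.py | verifica_numero
-- ===== SOURCE A (Python) =====
-- def verifica_numero(numero):
--     soma = 0
--     i = 0
--
--     if numero < 0:
--         return False
--     else:
--         string_numero = str(numero)
--         while i < len(string_numero):
--             valor_string = string_numero[i]
--             valor_operacao = int(valor_string)
--             conta = valor_operacao**valor_operacao
--             soma = soma + conta
--             i += 1
--
--         if soma == numero:
--             return True
--         else:
--             return False
-- ===== SOURCE B (Python) =====
-- def verifica_numero(numero):
--     # Arithmetic digit extraction instead of string conversion/indexing.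
--     if numero < 0:
--         return False
--     soma = 0
--     n = numero
--     while True:
--         d = n % 10
--         soma += d ** d
--         n //= 10
--         if n == 0:
--             break
--     return soma == numero
-- ===== Notes on version B (the rewrite author's own statement) =====
-- stated objective: alternative
-- what changed: Replaces str(numero) conversion and an indexed while-loop over the string with a do-while arithmetic digit extraction (n % 10, n //= 10) that needs no string; the do-while processes at least one digit, so the single-digit zero case matches A.
import Mathlib
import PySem

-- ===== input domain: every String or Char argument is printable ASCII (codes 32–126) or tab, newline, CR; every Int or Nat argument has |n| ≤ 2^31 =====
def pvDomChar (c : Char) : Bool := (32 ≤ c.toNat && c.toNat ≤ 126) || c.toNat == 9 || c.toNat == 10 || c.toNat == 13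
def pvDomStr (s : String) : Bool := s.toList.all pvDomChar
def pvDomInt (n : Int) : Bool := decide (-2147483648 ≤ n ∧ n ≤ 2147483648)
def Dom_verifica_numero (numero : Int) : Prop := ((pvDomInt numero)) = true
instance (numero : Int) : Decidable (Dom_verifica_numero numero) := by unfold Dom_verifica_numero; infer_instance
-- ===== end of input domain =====

-- B replaces str()-conversion plus an indexed while-loop with do-while arithmetic digit extraction (n % 10, n //= 10).


-- ===== PORT A =====
def verifica_numero (numero : Int) : Bool :=
  if numero < 0 then
    false
  else
    let string_numero := PySem.Int.toChars numero   -- str(numero)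
    -- while i < len(string_numero): … i += 1  — index loop over range(len)
    let soma := (PySem.List.pyRange 0 (PySem.List.len string_numero)).foldl
      (fun soma i =>
        let valor_string := PySem.List.pyGetD string_numero i ' '          -- string_numero[i], i always in range
        let valor_operacao := (PySem.Int.ofChars? [valor_string]).getD 0   -- int(valor_string); never raises: c is a decimal digit
        let conta := valor_operacao ^ valor_operacao.toNat                 -- valor_operacao ** valor_operacao (exponent ≥ 0 here)
        soma + conta) 0
    if soma == numero then true else false

-- ===== PORT B =====
-- do-while: processes the digit n % 10 at least once, then recurses on n // 10 until it is 0
def digitPowSumGo (n : Nat) : Int :=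
  let d := n % 10
  let t := (d : Int) ^ d                                                   -- d ** d (0 ** 0 == 1)
  if n / 10 = 0 then t else t + digitPowSumGo (n / 10)
termination_by n
decreasing_by exact Nat.div_lt_self (by omega) (by omega)

def verifica_numero_alt (numero : Int) : Bool :=
  if numero < 0 then false
  else digitPowSumGo numero.toNat == numero    -- numero ≥ 0: Nat % and / agree with Python's % and // here

-- ===== PRECONDITION & SPEC =====
def Spec_verifica_numero (numero : Int) (out : Bool) : Prop := out = verifica_numero_alt numero
instance (numero : Int) (out : Bool) : Decidable (Spec_verifica_numero numero out) := by unfold Spec_verifica_numero; infer_instance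

-- ===== CLAIM (what is proved, stated in full; the proofs are below) =====
def Claim_equal_verifica_numero : Prop := ∀ (numero : Int), Dom_verifica_numero numero → Spec_verifica_numero numero (verifica_numero numero)

-- ===== LEMMAS AND PROOFS =====

-- the per-character summand of A's loop
def pvStep (soma : Int) (c : Char) : Int :=
  let v := (PySem.Int.ofChars? [c]).getD 0
  soma + v ^ v.toNat

theorem pvStep_digitChar (d : Nat) (hd : d < 10) (s : Int) :
    pvStep s (Nat.digitChar d) = s + (d : Int) ^ d := by
  interval_cases d <;> (simp only [pvStep]; congr 1)

-- toDigitsCore's accumulator is an append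
theorem toDigitsCore_append (b : Nat) (fuel : Nat) :
    ∀ (n : Nat) (ds : List Char),
      Nat.toDigitsCore b fuel n ds = Nat.toDigitsCore b fuel n [] ++ ds := by
  induction fuel with
  | zero => intro n ds; simp [Nat.toDigitsCore]
  | succ fuel ih =>
    intro n ds
    simp only [Nat.toDigitsCore]
    by_cases h : n / b = 0
    · simp [h]
    · simp only [h, if_false]
      rw [ih (n / b) [(n % b).digitChar], ih (n / b) ((n % b).digitChar :: ds)]
      simp

theorem foldl_toDigitsCore (fuel : Nat) :
    ∀ (n : Nat), n < fuel →
      List.foldl pvStep 0 (Nat.toDigitsCore 10 fuel n []) = digitPowSumGo n := by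
  induction fuel with
  | zero => intro n h; omega
  | succ fuel ih =>
    intro n h
    rw [digitPowSumGo]
    simp only [Nat.toDigitsCore]
    by_cases h10 : n / 10 = 0
    · simp [h10, List.foldl, pvStep_digitChar (n % 10) (by omega)]
    · simp only [h10, if_false]
      rw [toDigitsCore_append, List.foldl_append,
        ih (n / 10) (by have := Nat.div_lt_self (by omega : 0 < n) (by omega : 1 < 10); omega)]
      simp [List.foldl, pvStep_digitChar (n % 10) (by omega)]
      ring

theorem foldl_toDigits (n : Nat) :
    List.foldl pvStep 0 (Nat.toDigits 10 n) = digitPowSumGo n :=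
  foldl_toDigitsCore (n + 1) n (Nat.lt_succ_self n)

-- ===== VERDICT (by name: the statement is the Claim_ definition above) =====
theorem verifica_numero_spec : Claim_equal_verifica_numero := by
  intro numero _
  unfold Spec_verifica_numero verifica_numero verifica_numero_alt
  by_cases hneg : numero < 0
  · simp [hneg]
  · simp only [hneg, if_false]
    have hA : (PySem.List.pyRange 0 (PySem.List.len (PySem.Int.toChars numero))).foldl
        (fun soma i =>
          let valor_string := PySem.List.pyGetD (PySem.Int.toChars numero) i ' '
          let valor_operacao := (PySem.Int.ofChars? [valor_string]).getD 0
          let conta := valor_operacao ^ valor_operacao.toNat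
          soma + conta) 0
        = List.foldl pvStep 0 (PySem.Int.toChars numero) := by
      have := PySem.List.foldl_pyRange_pyGetD (PySem.Int.toChars numero) ' ' pvStep 0
        (a := 0) (by omega)
      simpa [pvStep] using this
    rw [hA]
    have hchars : PySem.Int.toChars numero = Nat.toDigits 10 numero.toNat := by
      simp [PySem.Int.toChars, hneg]
    rw [hchars, foldl_toDigits]
    by_cases h : digitPowSumGo numero.toNat = numero <;> simp [h]
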